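-- pv_equiv track=rewrite | github.com/szubrilina/TextGeneration | Trash/TextGeneration_2.py | calculate_all_len_tokens
-- ===== SOURCE A (Python) =====
-- def get_string(list):
--     str = ""
--     for item in list:
--         str = str + item + ' '
--
--     str = str.rstrip(" ")
--     return str
--
-- def calculate_n_tokens(depth, tokens_list, probabilities):
--
--     current = []
--
--     for item in tokens_list:
--         current.append(item)
--
--         if len(current) < depth:
--             continue
--
--         str = get_string(current[:-1:])
--
--         if probabilities.get(str, None) is None:
--             probabilities[str] = dict()
--
--         if probabilities[str].get(item, None) is None:
--             probabilities[str][item] = 0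
--
--         probabilities[str][item] += 1
--
--         current = current[1::]
--
--     return probabilities
--
-- def calculate_all_len_tokens(max_depth,
--                              list):
--
--     probabilities = dict()
--
--     for d in range(1, max_depth + 1, 1):
--         probabilities = calculate_n_tokens(d,
--                                            list,
--                                            probabilities)
--
--     return probabilities
-- ===== SOURCE B (Python) =====
-- def calculate_all_len_tokens(max_depth, list):
--     n = len(list)
--     pairs = [(' '.join(list[i - d + 1:i]).rstrip(' '), list[i])
--              for d in range(1, max_depth + 1)
--              for i in range(d - 1, n)]
--     probabilities = {}
--     for key, item in pairs:
--         inner = probabilities.setdefault(key, {})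
--         inner[item] = inner.get(item, 0) + 1
--     return probabilities
-- ===== Notes on version B (the rewrite author's own statement) =====
-- stated objective: alternative
-- what changed: Replaces the per-depth sliding-window passes (mutable 'current' list rebuilt and re-trimmed inside nested loops, keys built by repeated string concatenation) by a flat comprehension producing all (context-key, next-token) pairs via index slicing and ' '.join, followed by one generic counting fold over that stream.
import Mathlib
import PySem

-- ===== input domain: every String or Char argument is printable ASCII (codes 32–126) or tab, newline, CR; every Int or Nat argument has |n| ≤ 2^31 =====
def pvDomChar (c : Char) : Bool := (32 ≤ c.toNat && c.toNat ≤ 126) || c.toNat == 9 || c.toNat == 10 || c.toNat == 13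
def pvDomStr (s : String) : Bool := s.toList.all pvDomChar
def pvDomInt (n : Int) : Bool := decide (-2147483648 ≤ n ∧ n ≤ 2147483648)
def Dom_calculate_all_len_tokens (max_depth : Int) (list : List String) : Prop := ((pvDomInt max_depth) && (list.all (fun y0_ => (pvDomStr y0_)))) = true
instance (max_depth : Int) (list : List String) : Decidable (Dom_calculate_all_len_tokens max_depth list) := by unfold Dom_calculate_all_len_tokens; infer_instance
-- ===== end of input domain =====

-- B replaces A's per-depth sliding-window passes by one flat (context-key, next-token) pair stream
-- built with index slicing, counted by a single generic dict fold (objective: alternative).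

-- ===== PORT A =====
-- shared primitive: Python's s.rstrip(' ') (PySem.Str.rstrip strips all whitespace, so this is
-- ported by hand: drop trailing ' ' characters; exact for every string)
def pvRstripSpace (s : String) : String :=
  String.ofList ((s.toList.reverse.dropWhile (· == ' ')).reverse)

def get_string (l : List String) : String :=
  pvRstripSpace (l.foldl (fun str item => str ++ item ++ " ") "")

-- one iteration of the 'for item in tokens_list' loop of calculate_n_tokens
def pv_nstep (depth : Int) (st : (List String) × PySem.Dict String (PySem.Dict String Int))
    (item : String) : (List String) × PySem.Dict String (PySem.Dict String Int) :=
  let current := st.1 ++ [item]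
  if (current.length : Int) < depth then (current, st.2)
  else
    let s := get_string (PySem.List.slice current none (some (-1)))
    let p := if (st.2.get? s).isNone then st.2.insert s PySem.Dict.empty else st.2
    let inner := p.getD s PySem.Dict.empty
    let p := if (inner.get? item).isNone then p.insert s (inner.insert item 0) else p
    let inner2 := p.getD s PySem.Dict.empty
    let p := p.insert s (inner2.insert item (inner2.getD item 0 + 1))
    (PySem.List.slice current (some 1) none, p)

def calculate_n_tokens (depth : Int) (tokens_list : List String)
    (probabilities : PySem.Dict String (PySem.Dict String Int)) :
    PySem.Dict String (PySem.Dict String Int) :=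
  (tokens_list.foldl (pv_nstep depth) ([], probabilities)).2

def calculate_all_len_tokens (max_depth : Int) (list : List String) :
    List (String × List (String × Int)) :=
  let probabilities := (PySem.List.pyRange 1 (max_depth + 1) 1).foldl
      (fun p d => calculate_n_tokens d list p) PySem.Dict.empty
  probabilities.items.map (fun kv => (kv.1, kv.2.items))

-- ===== PORT B =====
def calculate_all_len_tokens_alt (max_depth : Int) (list : List String) :
    List (String × List (String × Int)) :=
  let n : Int := list.length
  let pairs := (PySem.List.pyRange 1 (max_depth + 1) 1).flatMap (fun d =>
      (PySem.List.pyRange (d - 1) n 1).map (fun i =>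
        (pvRstripSpace (PySem.Str.join " " (PySem.List.slice list (some (i - d + 1)) (some i))),
         PySem.List.pyGetD list i "")))
  let probabilities := pairs.foldl (fun p kv =>
      let p1 := p.setdefault kv.1 PySem.Dict.empty
      let inner := p1.getD kv.1 PySem.Dict.empty
      p1.insert kv.1 (inner.insert kv.2 (inner.getD kv.2 0 + 1))) PySem.Dict.empty
  probabilities.items.map (fun kv => (kv.1, kv.2.items))

-- ===== PRECONDITION & SPEC =====
def Spec_calculate_all_len_tokens (max_depth : Int) (list : List String) (out : List (String × List (String × Int))) : Prop := out = calculate_all_len_tokens_alt max_depth list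
instance (max_depth : Int) (list : List String) (out : List (String × List (String × Int))) : Decidable (Spec_calculate_all_len_tokens max_depth list out) := by unfold Spec_calculate_all_len_tokens; infer_instance

-- ===== CLAIM (what is proved, stated in full; the proofs are below) =====
def Claim_equal_calculate_all_len_tokens : Prop := ∀ (max_depth : Int) (list : List String), Dom_calculate_all_len_tokens max_depth list → Spec_calculate_all_len_tokens max_depth list (calculate_all_len_tokens max_depth list)

-- ===== LEMMAS AND PROOFS =====

-- the common read-modify-write both dict updates reduce to
def pvIncr (p : PySem.Dict String (PySem.Dict String Int)) (key it : String) :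
    PySem.Dict String (PySem.Dict String Int) :=
  p.insert key ((p.getD key PySem.Dict.empty).insert it
    ((p.getD key PySem.Dict.empty).getD it 0 + 1))

-- ---- string lemmas: get_string l = rstrip-space (Str.join " " l) ----

theorem pvRstrip_toList_congr {s t : String} (h : s.toList = t.toList) :
    pvRstripSpace s = pvRstripSpace t := by unfold pvRstripSpace; rw [h]

theorem pvRstrip_concat (cs : List Char) :
    pvRstripSpace (String.ofList (cs ++ [' '])) = pvRstripSpace (String.ofList cs) := by
  simp [pvRstripSpace]

theorem fold_toList (l : List String) (a : String) :
    (l.foldl (fun str item => str ++ item ++ " ") a).toList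
      = a.toList ++ (l.map (fun it => it.toList ++ [' '])).flatten := by
  induction l generalizing a with
  | nil => simp
  | cons x rest ih => simp [ih, String.toList_append]

theorem flatten_eq_join (x : List Char) (rest : List (List Char)) :
    ((x :: rest).map (· ++ [' '])).flatten = PySem.Chars.join [' '] (x :: rest) ++ [' '] := by
  induction rest generalizing x with
  | nil => simp [PySem.Chars.join_singleton]
  | cons y rest' ih =>
      rw [PySem.Chars.join_cons_cons]
      have := ih y
      simp only [List.map_cons, List.flatten_cons] at this ⊢
      rw [this]
      simp

theorem key_eq (l : List String) :
    get_string l = pvRstripSpace (PySem.Str.join " " l) := by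
  cases l with
  | nil =>
      apply pvRstrip_toList_congr
      simp [PySem.Str.toList_join, PySem.Chars.join_nil]
  | cons x rest =>
      unfold get_string
      have h1 := fold_toList (x :: rest) ""
      have h2 : (x :: rest).map (fun it => it.toList ++ [' '])
          = (((x :: rest).map String.toList).map (· ++ [' '])) := by simp
      rw [h2] at h1
      rw [List.map_cons, flatten_eq_join] at h1
      rw [← @List.map_cons _ _ String.toList x rest] at h1
      calc pvRstripSpace ((x :: rest).foldl (fun str item => str ++ item ++ " ") "")
          = pvRstripSpace (String.ofList
              (PySem.Chars.join [' '] ((x :: rest).map String.toList) ++ [' '])) := by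
            apply pvRstrip_toList_congr; rw [h1, String.toList_ofList]; simp
        _ = pvRstripSpace (String.ofList
              (PySem.Chars.join [' '] ((x :: rest).map String.toList))) := pvRstrip_concat _
        _ = pvRstripSpace (PySem.Str.join " " (x :: rest)) := by
            apply pvRstrip_toList_congr
            simp [PySem.Str.toList_join]

-- ---- both dict-update sequences are pvIncr ----

theorem dictA_eq (p : PySem.Dict String (PySem.Dict String Int)) (s it : String) :
    (let p1 := if (p.get? s).isNone then p.insert s PySem.Dict.empty else p
     let inner := p1.getD s PySem.Dict.empty
     let p2 := if (inner.get? it).isNone then p1.insert s (inner.insert it 0) else p1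
     let inner2 := p2.getD s PySem.Dict.empty
     p2.insert s (inner2.insert it (inner2.getD it 0 + 1))) = pvIncr p s it := by
  simp only [pvIncr, PySem.Dict.getD]
  rcases hp : p.get? s with _ | v
  · simp [PySem.Dict.get?_insert_self, PySem.Dict.insert_insert_self]
  · simp only [hp, Option.isNone_some, Bool.false_eq_true, if_false, Option.getD_some]
    rcases hv : v.get? it with _ | w
    · simp [PySem.Dict.get?_insert_self, PySem.Dict.insert_insert_self]
    · simp [hv, hp]

theorem dictB_eq (p : PySem.Dict String (PySem.Dict String Int)) (s it : String) :
    (let p1 := p.setdefault s PySem.Dict.empty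
     let inner := p1.getD s PySem.Dict.empty
     p1.insert s (inner.insert it (inner.getD it 0 + 1))) = pvIncr p s it := by
  rcases hc : p.contains s with _ | _
  · rw [PySem.Dict.setdefault_of_not_contains p _ hc]
    have hp : p.get? s = none := by
      have := PySem.Dict.contains_eq_isSome_get? p s
      rw [hc] at this
      cases h : p.get? s
      · rfl
      · rw [h] at this; simp at this
    simp [pvIncr, PySem.Dict.insert_insert_self, PySem.Dict.getD, hp]
  · rw [PySem.Dict.setdefault_of_contains p _ hc]; rfl

-- ---- A's loop body, the two branches ----

theorem step_lt (depth : Int) (cur : List String) (p) (item : String)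
    (h : ((cur.length : Int) + 1) < depth) :
    pv_nstep depth (cur, p) item = (cur ++ [item], p) := by
  simp only [pv_nstep]
  rw [if_pos (by simpa using h)]

theorem step_ge (depth : Int) (cur : List String) (p) (item : String)
    (h : ¬ ((cur.length : Int) + 1) < depth) :
    pv_nstep depth (cur, p) item = ((cur ++ [item]).tail, pvIncr p (get_string cur) item) := by
  simp only [pv_nstep]
  rw [if_neg (by simpa using h)]
  rw [PySem.List.slice_to_neg_one, PySem.List.slice_from_one, List.dropLast_concat]
  rw [dictA_eq]

-- ---- A's inner loop ≡ a guarded fold over all indices ----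

theorem loopA (dN : ℕ) (hd : 1 ≤ dN) (tokens : List String) :
    ∀ (m j : ℕ) (p), j + m = tokens.length →
    ((tokens.drop j).foldl (pv_nstep (dN : Int)) ((tokens.take j).drop (j + 1 - dN), p)).2
    = (List.range' j m).foldl
        (fun p i => if dN ≤ i + 1 then
            pvIncr p (get_string ((tokens.take i).drop (i + 1 - dN))) (tokens.getD i "")
          else p) p := by
  intro m
  induction m with
  | zero =>
      intro j p hj
      rw [show tokens.drop j = [] from List.drop_eq_nil_of_le (by omega)]
      rfl
  | succ m ih =>
      intro j p hj
      have hjlt : j < tokens.length := by omega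
      rw [List.drop_eq_getElem_cons hjlt, List.foldl_cons, List.range'_succ, List.foldl_cons]
      have hcur : (tokens.take j).drop (j + 1 - dN) ++ [tokens[j]]
          = (tokens.take (j + 1)).drop (j + 1 - dN) := by
        rw [List.take_add_one, List.getElem?_eq_getElem hjlt]
        rw [List.drop_append_of_le_length (by simp; omega)]
        rfl
      by_cases hge : dN ≤ j + 1
      · rw [step_ge _ _ _ _ (by simp; omega), if_pos hge]
        rw [hcur, List.tail_drop]
        have : j + 1 - dN + 1 = (j + 1) + 1 - dN := by omega
        rw [this, List.getD_eq_getElem?_getD, List.getElem?_eq_getElem hjlt]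
        exact ih (j + 1) _ (by omega)
      · rw [step_lt _ _ _ _ (by simp; omega), if_neg hge]
        rw [hcur]
        have : j + 1 - dN = (j + 1) + 1 - dN := by omega
        rw [this]
        exact ih (j + 1) _ (by omega)

-- ---- dropping the guard: fold over indices ≥ dN - 1 ----

theorem fold_guard_id {β : Type} (dN : ℕ) (F : β → ℕ → β) :
    ∀ (l : List ℕ) (p : β), (∀ i ∈ l, ¬ dN ≤ i + 1) →
    l.foldl (fun p i => if dN ≤ i + 1 then F p i else p) p = p := by
  intro l
  induction l with
  | nil => intro p _; rfl
  | cons x rest ih =>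
      intro p h
      rw [List.foldl_cons, if_neg (h x (by simp))]
      exact ih p (fun i hi => h i (by simp [hi]))

theorem guard_elim {β : Type} (dN : ℕ) (hd : 1 ≤ dN) (n : ℕ) (F : β → ℕ → β) (p : β) :
    (List.range' 0 n).foldl (fun p i => if dN ≤ i + 1 then F p i else p) p
    = (List.range' (dN - 1) (n - (dN - 1))).foldl F p := by
  have hsplit : List.range' 0 (min (dN - 1) n) ++ List.range' (min (dN - 1) n) (n - min (dN - 1) n)
      = List.range' 0 n := by
    have := @List.range'_append 0 (min (dN - 1) n) (n - min (dN - 1) n) 1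
    simpa using this.trans (by congr 1; omega)
  rw [← hsplit, List.foldl_append]
  rw [fold_guard_id dN F _ p (by intro i hi; rw [List.mem_range'] at hi; omega)]
  by_cases hc : dN - 1 ≤ n
  · rw [min_eq_left hc]
    apply PySem.List.foldl_congr_mem
    intro acc i hi
    rw [List.mem_range'] at hi
    rw [if_pos (by omega)]
  · rw [min_eq_right (by omega), show n - (dN - 1) = 0 from by omega,
      show n - n = 0 from by omega]
    rfl

-- ---- B's per-depth pair list folds to the same thing ----

theorem foldl_flatMap {α β γ : Type} (l : List α) (g : α → List β) (f : γ → β → γ) (init : γ) :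
    (l.flatMap g).foldl f init = l.foldl (fun acc d => (g d).foldl f acc) init := by
  induction l generalizing init with
  | nil => rfl
  | cons x rest ih => simp [List.foldl_append, ih]

theorem B_depth (dN : ℕ) (hd : 1 ≤ dN) (tokens : List String) (p : PySem.Dict String (PySem.Dict String Int)) :
    ((PySem.List.pyRange ((dN : Int) - 1) (tokens.length : Int) 1).map (fun i =>
        (pvRstripSpace (PySem.Str.join " " (PySem.List.slice tokens (some (i - (dN : Int) + 1)) (some i))),
         PySem.List.pyGetD tokens i ""))).foldl (fun p kv =>
      let p1 := p.setdefault kv.1 PySem.Dict.empty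
      let inner := p1.getD kv.1 PySem.Dict.empty
      p1.insert kv.1 (inner.insert kv.2 (inner.getD kv.2 0 + 1))) p
    = (List.range' (dN - 1) (tokens.length - (dN - 1))).foldl
        (fun p i => pvIncr p (get_string ((tokens.take i).drop (i + 1 - dN))) (tokens.getD i "")) p := by
  rw [PySem.List.pyRange_one]
  have hM : (((tokens.length : Int)) - ((dN : Int) - 1)).toNat = tokens.length - (dN - 1) := by omega
  rw [hM, List.foldl_map, List.foldl_map, List.range'_eq_map_range, List.foldl_map]
  apply PySem.List.foldl_congr_mem
  intro acc k hk
  rw [List.mem_range] at hk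
  rw [dictB_eq]
  have hiN : (((dN : Int) - 1) + (k : Int)).toNat = (dN - 1) + k := by omega
  have hkey : PySem.List.slice tokens (some ((((dN : Int) - 1) + (k : Int)) - (dN : Int) + 1))
      (some (((dN : Int) - 1) + (k : Int))) = (tokens.drop k).take (dN - 1) := by
    rw [show (((dN : Int) - 1) + (k : Int)) - (dN : Int) + 1 = (k : Int) from by ring]
    rw [PySem.List.slice_toNat tokens (by omega) (by omega)]
    rw [hiN]
    congr 1
    omega
  rw [hkey]
  have hctx : (tokens.take ((dN - 1) + k)).drop ((dN - 1) + k + 1 - dN) = (tokens.drop k).take (dN - 1) := by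
    rw [show (dN - 1) + k + 1 - dN = k from by omega, List.drop_take]
    congr 1
    omega
  rw [hctx, key_eq]
  rw [PySem.List.pyGetD_of_nonneg tokens "" (by omega), hiN]

-- ---- assembling the two programs ----

theorem n_tokens_eq (dN : ℕ) (hd : 1 ≤ dN) (tokens : List String) (p : PySem.Dict String (PySem.Dict String Int)) :
    calculate_n_tokens (dN : Int) tokens p
    = (List.range' 0 tokens.length).foldl
        (fun p i => if dN ≤ i + 1 then
            pvIncr p (get_string ((tokens.take i).drop (i + 1 - dN))) (tokens.getD i "")
          else p) p := by
  unfold calculate_n_tokens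
  have := loopA dN hd tokens tokens.length 0 p (by omega)
  simpa using this

theorem dicts_eq (max_depth : Int) (list : List String) :
    (PySem.List.pyRange 1 (max_depth + 1) 1).foldl
        (fun p d => calculate_n_tokens d list p) PySem.Dict.empty
    = ((PySem.List.pyRange 1 (max_depth + 1) 1).flatMap (fun d =>
        (PySem.List.pyRange (d - 1) (list.length : Int) 1).map (fun i =>
          (pvRstripSpace (PySem.Str.join " " (PySem.List.slice list (some (i - d + 1)) (some i))),
           PySem.List.pyGetD list i "")))).foldl (fun p kv =>
        let p1 := p.setdefault kv.1 PySem.Dict.empty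
        let inner := p1.getD kv.1 PySem.Dict.empty
        p1.insert kv.1 (inner.insert kv.2 (inner.getD kv.2 0 + 1))) PySem.Dict.empty := by
  rw [foldl_flatMap]
  apply PySem.List.foldl_congr_mem
  intro acc d hd
  have h1 : 1 ≤ d := ((PySem.List.mem_pyRange_one).1 hd).1
  have hcast : ((d.toNat : Int)) = d := by omega
  have hdN : 1 ≤ d.toNat := by omega
  rw [← hcast]
  rw [n_tokens_eq d.toNat hdN list acc, guard_elim d.toNat hdN list.length _ acc,
    ← B_depth d.toNat hdN list acc]

-- ===== VERDICT (by name: the statement is the Claim_ definition above) =====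
theorem calculate_all_len_tokens_spec : Claim_equal_calculate_all_len_tokens := by
  intro max_depth list _
  unfold Spec_calculate_all_len_tokens calculate_all_len_tokens calculate_all_len_tokens_alt
  rw [dicts_eq max_depth list]
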